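-- pv_equiv track=rewrite | github.com/alice-werefox/aoc-2025 | 06/main.py | translate_input
-- ===== SOURCE A (Python) =====
-- def translate_input(numbers: list[str], operators: str) -> list[tuple[list[int], str]]:
--     cephalapod_math: list[tuple[list[int], str]] = []
--     current_numbers: list[int] = []
--     current_operator = operators[0]
--
--     for i in range(len(operators)):
--         if operators[i] in ["+", "*"] and current_numbers != []:
--             cephalapod_math.append((current_numbers, current_operator))
--             current_operator = operators[i]
--             current_numbers = []
--         temp_number: str = ""
--         for row in numbers:
--             temp_number += row[i].strip()
--         if temp_number != "":
--             current_numbers.append(int(temp_number))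
--     cephalapod_math.append((current_numbers, current_operator))
--
--     return cephalapod_math
-- ===== SOURCE B (Python) =====
-- def translate_input(numbers: list[str], operators: str) -> list[tuple[list[int], str]]:
--     # Phase 1: column token table — positions and values of the non-blank columns.
--     positions: list[int] = []
--     values: list[int] = []
--     for i in range(len(operators)):
--         digits = "".join(row[i].strip() for row in numbers)
--         if digits:
--             positions.append(i)
--             values.append(int(digits))
--     # Phase 2: two-pointer sweep over the operator string against the sorted
--     # position list; a group closes at an operator column preceded by numbers.
--     groups: list[tuple[list[int], str]] = []
--     pending = operators[0]
--     j = 0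
--     for p, ch in enumerate(operators):
--         if ch == "+" or ch == "*":
--             k = j
--             while k < len(positions) and positions[k] < p:
--                 k += 1
--             if k > j:
--                 groups.append((values[j:k], pending))
--                 pending = ch
--                 j = k
--     groups.append((values[j:], pending))
--     return groups
-- ===== Notes on version B (the rewrite author's own statement) =====
-- stated objective: alternative
-- what changed: A's single stateful column scan is split into building a token table (positions and values of non-blank columns) and a separate two-pointer sweep over the operator string that advances a pointer into the sorted position list and emits slices values[j:k] when a group closes.
-- outside the precondition, e.g. on translate_input([], ''): A raises IndexError, B raises IndexError; on translate_input(['a'], '+'): A raises ValueError, B raises ValueError; on translate_input(['1'], '++'): A raises IndexError, B raises IndexError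
import Mathlib
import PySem

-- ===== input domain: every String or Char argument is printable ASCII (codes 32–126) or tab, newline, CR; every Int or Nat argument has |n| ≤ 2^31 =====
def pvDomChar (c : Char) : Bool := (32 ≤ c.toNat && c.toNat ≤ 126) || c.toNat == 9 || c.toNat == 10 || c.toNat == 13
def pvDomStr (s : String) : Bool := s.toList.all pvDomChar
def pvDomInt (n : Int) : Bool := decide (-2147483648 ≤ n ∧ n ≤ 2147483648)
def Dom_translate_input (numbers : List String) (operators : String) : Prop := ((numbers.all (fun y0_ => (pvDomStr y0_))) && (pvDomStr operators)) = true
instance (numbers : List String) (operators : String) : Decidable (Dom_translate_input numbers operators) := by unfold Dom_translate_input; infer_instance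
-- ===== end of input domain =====

-- B replaces A's single stateful scan by a column token table (positions/values of
-- non-blank columns) plus a two-pointer sweep over the operator string; objective: alternative.

-- ===== PORT A =====
-- literal transliteration of A: one pass over the columns with state
-- (cephalapod_math, current_numbers, current_operator); the inner loop over the
-- rows concatenates the stripped column characters.
def translate_input (numbers : List String) (operators : String) : List (List Int × String) :=
  let ops := operators.toList
  let current_operator := (PySem.Str.pyGet? operators 0).getD ' '  -- operators[0]; IndexError (empty) excluded by Pre_
  let st := (PySem.List.pyRange 0 (PySem.Str.len operators) 1).foldl
    (fun (st : List (List Int × String) × List Int × Char) i =>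
      let st :=
        if (PySem.List.pyGetD ops i ' ' == '+' || PySem.List.pyGetD ops i ' ' == '*') && !st.2.1.isEmpty then
          (st.1 ++ [(st.2.1, String.ofList [st.2.2])], ([] : List Int), PySem.List.pyGetD ops i ' ')
        else st
      let temp := numbers.foldl (fun t row => t ++ PySem.Chars.strip [(PySem.Str.pyGet? row i).getD ' ']) []
        -- row[i]: IndexError (short row) excluded by Pre_
      if !temp.isEmpty then (st.1, st.2.1 ++ [(PySem.Int.ofChars? temp).getD 0], st.2.2) else st)
        -- int(temp_number): ValueError excluded by Pre_
    ([], [], current_operator)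
  st.1 ++ [(st.2.1, String.ofList [st.2.2])]

-- ===== PORT B =====
-- B's while loop: advance k while k < len(positions) and positions[k] < p
def tiAdvance (positions : List Int) (p : Int) (k : Nat) : Nat :=
  if h : k < positions.length then
    if positions[k] < p then tiAdvance positions p (k + 1) else k
  else k
termination_by positions.length - k

-- literal transliteration of B (Source B): phase 1 builds the (positions, values)
-- token table of the non-blank columns; phase 2 sweeps enumerate(operators)
-- with a pointer j into that table, emitting the slice values[j:k] at each
-- closing operator column.
def translate_input_alt (numbers : List String) (operators : String) : List (List Int × String) :=
  let pv := (PySem.List.pyRange 0 (PySem.Str.len operators) 1).foldl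
    (fun (acc : List Int × List Int) i =>
      let digits := PySem.Chars.join [] (numbers.map (fun row => PySem.Chars.strip [(PySem.Str.pyGet? row i).getD ' ']))
      if !digits.isEmpty then (acc.1 ++ [i], acc.2 ++ [(PySem.Int.ofChars? digits).getD 0]) else acc)
    ([], [])
  let positions := pv.1
  let values := pv.2
  let st := (PySem.List.enumerate operators.toList).foldl
    (fun (st : List (List Int × String) × Char × Nat) pc =>
      if pc.2 == '+' || pc.2 == '*' then
        let k := tiAdvance positions pc.1 st.2.2
        if st.2.2 < k then
          (st.1 ++ [(PySem.List.slice values (some (st.2.2 : Int)) (some (k : Int)), String.ofList [st.2.1])], pc.2, k)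
        else st
      else st)
    ([], (PySem.Str.pyGet? operators 0).getD ' ', 0)
  st.1 ++ [(PySem.List.slice values (some (st.2.2 : Int)) none, String.ofList [st.2.1])]

-- ===== PRECONDITION & SPEC =====
-- the stripped column string of column i (used only to state Pre_)
def tiColPre (numbers : List String) (i : Nat) : List Char :=
  (numbers.map (fun row => row.toList.getD i ' ')).filter (fun c => !PySem.Chars.isspace c)

-- Pre_ excludes exactly the inputs where Python A raises: empty operators
-- (IndexError on operators[0]), a row shorter than operators (IndexError on
-- row[i]), and a non-blank column whose concatenated string is not a valid
-- int literal (ValueError on int(temp_number)).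
def Pre_translate_input (numbers : List String) (operators : String) : Prop :=
  operators.toList ≠ [] ∧
  (∀ row ∈ numbers, operators.toList.length ≤ row.toList.length) ∧
  (∀ i < operators.toList.length,
    tiColPre numbers i ≠ [] → (PySem.Int.ofChars? (tiColPre numbers i)).isSome = true)
instance (numbers : List String) (operators : String) : Decidable (Pre_translate_input numbers operators) := by
  unfold Pre_translate_input; infer_instance

def pvWitness_translate_input : List String × String := (["1 2", "3 4"], " + "  )

def Spec_translate_input (numbers : List String) (operators : String) (out : List (List Int × String)) : Prop := out = translate_input_alt numbers operators
instance (numbers : List String) (operators : String) (out : List (List Int × String)) : Decidable (Spec_translate_input numbers operators out) := by unfold Spec_translate_input; infer_instance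

-- ===== CLAIM (what is proved, stated in full; the proofs are below) =====
def Claim_equal_translate_input : Prop := ∀ (numbers : List String) (operators : String), Dom_translate_input numbers operators → Pre_translate_input numbers operators → Spec_translate_input numbers operators (translate_input numbers operators)

-- ===== LEMMAS AND PROOFS =====

-- column i as a flat list of stripped characters (both ports compute this)
def tiCol (numbers : List String) (i : Int) : List Char :=
  numbers.flatMap (fun row => PySem.Chars.strip [(PySem.Str.pyGet? row i).getD ' '])

def tiVal (numbers : List String) (i : Int) : Int := (PySem.Int.ofChars? (tiCol numbers i)).getD 0

def tiNum (numbers : List String) (i : Int) : Bool := !(tiCol numbers i).isEmpty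

-- reference recursion: the grouping both ports implement, over a list of column indices
def tiRef (numbers : List String) (ops : List Char) : List Int → List Int → Char → List (List Int × String)
  | [], nums, op => [(nums, String.ofList [op])]
  | i :: rest, nums, op =>
    if (PySem.List.pyGetD ops i ' ' == '+' || PySem.List.pyGetD ops i ' ' == '*') && !nums.isEmpty then
      (nums, String.ofList [op]) :: tiRef numbers ops rest
        (if tiNum numbers i then [tiVal numbers i] else []) (PySem.List.pyGetD ops i ' ')
    else
      tiRef numbers ops rest (if tiNum numbers i then nums ++ [tiVal numbers i] else nums) op

-- token table of B, described directly
def tiP (numbers : List String) (operators : String) : List Int :=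
  (PySem.List.pyRange 0 (PySem.Str.len operators) 1).filter (fun i => tiNum numbers i)
def tiV (numbers : List String) (operators : String) : List Int :=
  (tiP numbers operators).map (tiVal numbers)
def tiCnt (numbers : List String) (operators : String) (m : Int) : Nat :=
  (tiP numbers operators).countP (fun x => decide (x < m))

-- B's phase-2 loop body, named (definitionally equal to the port's lambda)
def tiBStep (numbers : List String) (operators : String)
    (st : List (List Int × String) × Char × Nat) (i : Int) : List (List Int × String) × Char × Nat :=
  if PySem.List.pyGetD operators.toList i ' ' == '+' || PySem.List.pyGetD operators.toList i ' ' == '*' then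
    let k := tiAdvance (tiP numbers operators) i st.2.2
    if st.2.2 < k then
      (st.1 ++ [(PySem.List.slice (tiV numbers operators) (some (st.2.2 : Int)) (some (k : Int)), String.ofList [st.2.1])],
       PySem.List.pyGetD operators.toList i ' ', k)
    else st
  else st

lemma tiP_eq (numbers : List String) (operators : String) :
    (PySem.List.pyRange 0 (PySem.Str.len operators) 1).filter (fun i => tiNum numbers i)
      = tiP numbers operators := rfl

-- A's inner row loop computes tiCol
lemma tiTemp_eq (numbers : List String) (i : Int) :
    numbers.foldl (fun t row => t ++ PySem.Chars.strip [(PySem.Str.pyGet? row i).getD ' ']) []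
      = tiCol numbers i := by
  rw [PySem.List.foldl_append_eq_flatMap]; rfl

lemma tiJoinFlatten (l : List (List Char)) : PySem.Chars.join [] l = l.flatten := by
  induction l with
  | nil => simp [PySem.Chars.join_nil]
  | cons x t ih =>
    cases t with
    | nil => simp [PySem.Chars.join_singleton]
    | cons y t' => rw [PySem.Chars.join_cons_cons]; simp at ih ⊢; simp [ih]

-- B's join of the stripped column chars computes tiCol
lemma tiJoin_eq (numbers : List String) (i : Int) :
    PySem.Chars.join [] (numbers.map (fun row => PySem.Chars.strip [(PySem.Str.pyGet? row i).getD ' ']))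
      = tiCol numbers i := by
  rw [tiJoinFlatten, ← List.flatMap_def]; rfl

lemma tiNum_false (numbers : List String) (a : Int) (h : ¬ ((!(tiCol numbers a).isEmpty) = true)) :
    tiNum numbers a = false := by
  unfold tiNum; simpa using h

lemma tiEta3 {A B C D : Type} (f : A × B × C → D → A × B × C) (st0 : A × B × C) (a : D) (l : List D) :
    List.foldl f st0 (a :: l) = List.foldl f ((f st0 a).1, (f st0 a).2.1, (f st0 a).2.2) l := rfl

-- A's fold equals the reference recursion
lemma tiA_fold (numbers : List String) (ops : List Char) (L : List Int)
    (ceph : List (List Int × String)) (nums : List Int) (op : Char) :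
    (fun st : List (List Int × String) × List Int × Char => st.1 ++ [(st.2.1, String.ofList [st.2.2])])
      (L.foldl
        (fun (st : List (List Int × String) × List Int × Char) i =>
          let st :=
            if (PySem.List.pyGetD ops i ' ' == '+' || PySem.List.pyGetD ops i ' ' == '*') && !st.2.1.isEmpty then
              (st.1 ++ [(st.2.1, String.ofList [st.2.2])], ([] : List Int), PySem.List.pyGetD ops i ' ')
            else st
          let temp := numbers.foldl (fun t row => t ++ PySem.Chars.strip [(PySem.Str.pyGet? row i).getD ' ']) []
          if !temp.isEmpty then (st.1, st.2.1 ++ [(PySem.Int.ofChars? temp).getD 0], st.2.2) else st)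
        (ceph, nums, op))
      = ceph ++ tiRef numbers ops L nums op := by
  induction L generalizing ceph nums op with
  | nil => simp [tiRef]
  | cons a L ih =>
    rw [tiEta3, ih]
    rw [tiRef]
    dsimp only
    rw [tiTemp_eq]
    by_cases h : ((PySem.List.pyGetD ops a ' ' == '+' || PySem.List.pyGetD ops a ' ' == '*') && !nums.isEmpty) = true
    · rw [if_pos h]
      by_cases hn : (!(tiCol numbers a).isEmpty) = true
      · have hn' : tiNum numbers a = true := hn
        rw [if_pos hn]
        simp [h, hn', tiVal]
      · have hn' : tiNum numbers a = false := tiNum_false numbers a hn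
        rw [if_neg hn]
        simp [h, hn']
    · have hF : ((PySem.List.pyGetD ops a ' ' == '+' || PySem.List.pyGetD ops a ' ' == '*') && !nums.isEmpty) = false := by
        simpa using h
      rw [if_neg h]
      by_cases hn : (!(tiCol numbers a).isEmpty) = true
      · have hn' : tiNum numbers a = true := hn
        rw [if_pos hn]
        simp [hF, hn', tiVal]
      · have hn' : tiNum numbers a = false := tiNum_false numbers a hn
        rw [if_neg hn]
        simp [hF, hn']

-- B's phase-1 fold builds exactly the token table
lemma tiB_pv (numbers : List String) (L : List Int) (acc : List Int × List Int) :
    (L.foldl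
      (fun (acc : List Int × List Int) i =>
        let digits := PySem.Chars.join [] (numbers.map (fun row => PySem.Chars.strip [(PySem.Str.pyGet? row i).getD ' ']))
        if !digits.isEmpty then (acc.1 ++ [i], acc.2 ++ [(PySem.Int.ofChars? digits).getD 0]) else acc)
      acc)
      = (acc.1 ++ L.filter (fun i => tiNum numbers i),
         acc.2 ++ (L.filter (fun i => tiNum numbers i)).map (tiVal numbers)) := by
  induction L generalizing acc with
  | nil => simp
  | cons a L ih =>
    rw [List.foldl_cons, ih]
    dsimp only
    rw [tiJoin_eq, List.filter_cons]
    by_cases h : (!(tiCol numbers a).isEmpty) = true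
    · have hn : tiNum numbers a = true := h
      rw [if_pos h]
      simp [hn, tiVal]
    · have hn : tiNum numbers a = false := tiNum_false numbers a h
      rw [if_neg h]
      simp [hn]

-- for a strictly sorted list, the elements below p are exactly the first countP
lemma tiSorted_get_iff (P : List Int) (hs : P.Pairwise (· < ·)) (p : Int) (k : Nat) (hk : k < P.length) :
    P[k] < p ↔ k < P.countP (fun x => decide (x < p)) := by
  induction P generalizing k with
  | nil => simp at hk
  | cons a P ih =>
    have ha := List.pairwise_cons.mp hs
    rcases Nat.eq_zero_or_pos k with hk0 | hk0
    · subst hk0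
      simp only [List.getElem_cons_zero, List.countP_cons]
      constructor
      · intro h
        have : (if decide (a < p) = true then 1 else 0) = 1 := by simp [h]
        omega
      · intro h
        by_contra hc
        have hz : P.countP (fun x => decide (x < p)) = 0 := by
          apply List.countP_eq_zero.mpr
          intro x hx
          have := ha.1 x hx
          simp only [decide_eq_true_eq]
          omega
        have : (if decide (a < p) = true then 1 else 0) = 0 := by simp [hc]
        omega
    · obtain ⟨k', rfl⟩ : ∃ k', k = k' + 1 := ⟨k - 1, by omega⟩
      simp only [List.getElem_cons_succ, List.countP_cons]
      have hk' : k' < P.length := by simpa using hk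
      rw [ih ha.2 k' hk']
      by_cases hap : a < p
      · simp [hap]
      · have hz : P.countP (fun x => decide (x < p)) = 0 := by
          apply List.countP_eq_zero.mpr
          intro x hx
          have := ha.1 x hx
          simp only [decide_eq_true_eq]
          omega
        have hgt := ha.1 _ (List.getElem_mem hk')
        have : (if decide (a < p) = true then 1 else 0) = 0 := by simp [hap]
        constructor
        · intro hlt; omega
        · intro hlt; omega

lemma tiAdvance_eq (P : List Int) (hs : P.Pairwise (· < ·)) (p : Int) (j : Nat)
    (hj : j ≤ P.countP (fun x => decide (x < p))) :
    tiAdvance P p j = P.countP (fun x => decide (x < p)) := by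
  have hlen : P.countP (fun x => decide (x < p)) ≤ P.length := List.countP_le_length
  by_cases h : j < P.length
  · rw [tiAdvance, dif_pos h]
    by_cases hlt : P[j] < p
    · have := (tiSorted_get_iff P hs p j h).mp hlt
      rw [if_pos hlt]
      exact tiAdvance_eq P hs p (j + 1) (by omega)
    · have := mt (tiSorted_get_iff P hs p j h).mpr hlt
      rw [if_neg hlt]
      omega
  · rw [tiAdvance, dif_neg h]
    omega
termination_by P.length - j

lemma tiP_sorted (numbers : List String) (operators : String) :
    (tiP numbers operators).Pairwise (· < ·) :=
  (PySem.List.pairwise_lt_pyRange_one 0 (PySem.Str.len operators)).filter _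

lemma tiVP_len (numbers : List String) (operators : String) :
    (tiV numbers operators).length = (tiP numbers operators).length := by
  simp [tiV]

lemma tiCnt_le (numbers : List String) (operators : String) (m : Int) :
    tiCnt numbers operators m ≤ (tiV numbers operators).length := by
  rw [tiVP_len]
  exact List.countP_le_length

lemma tiCntSplit (l : List Int) (m : Int) :
    l.countP (fun x => decide (x < m + 1)) = l.countP (fun x => decide (x < m)) + l.count m := by
  induction l with
  | nil => simp
  | cons a t ih =>
    simp only [List.countP_cons, List.count_cons, ih, beq_iff_eq, decide_eq_true_eq]
    split_ifs <;> omega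

lemma tiP_mem_iff (numbers : List String) (operators : String) (m : Int) (hm : 0 ≤ m)
    (hmn : m < PySem.Str.len operators) :
    m ∈ tiP numbers operators ↔ tiNum numbers m = true := by
  have hmn2 : m < ((operators.toList.length : Int)) := by
    have := PySem.Str.len_eq operators
    omega
  simp only [tiP, List.mem_filter, PySem.List.mem_pyRange_one]
  constructor
  · exact fun h => h.2
  · intro h
    refine ⟨⟨hm, hmn⟩, h⟩

-- cnt at m+1
lemma tiCnt_succ (numbers : List String) (operators : String) (m : Int) (hm : 0 ≤ m)
    (hmn : m < PySem.Str.len operators) :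
    tiCnt numbers operators (m + 1)
      = tiCnt numbers operators m + (if tiNum numbers m then 1 else 0) := by
  have hnd : (tiP numbers operators).Nodup :=
    (PySem.List.nodup_pyRange_one 0 (PySem.Str.len operators)).filter _
  have hmem := tiP_mem_iff numbers operators m hm hmn
  simp only [tiCnt, tiCntSplit]
  by_cases hn : tiNum numbers m = true
  · rw [List.count_eq_one_of_mem hnd (hmem.mpr hn)]
    simp [hn]
  · rw [List.count_eq_zero_of_not_mem (fun hc => hn (hmem.mp hc))]
    simp [hn]

lemma tiCnt_mono (numbers : List String) (operators : String) (m : Int) (hm : 0 ≤ m)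
    (hmn : m < PySem.Str.len operators) :
    tiCnt numbers operators m ≤ tiCnt numbers operators (m + 1) := by
  rw [tiCnt_succ numbers operators m hm hmn]
  split_ifs <;> omega

-- m is at index (cnt m) in tiP when it is a numeric column
lemma tiP_get_cnt (numbers : List String) (operators : String) (m : Int) (hm : 0 ≤ m)
    (hmn : m < PySem.Str.len operators) (hn : tiNum numbers m = true) :
    ∃ h : tiCnt numbers operators m < (tiP numbers operators).length,
      (tiP numbers operators)[tiCnt numbers operators m] = m := by
  have hmem : m ∈ tiP numbers operators := (tiP_mem_iff numbers operators m hm hmn).mpr hn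
  obtain ⟨k, hk, hkm⟩ := List.getElem_of_mem hmem
  have hs := tiP_sorted numbers operators
  have h1 : ¬ (tiP numbers operators)[k] < m := by omega
  have h1' : ¬ k < (tiP numbers operators).countP (fun x => decide (x < m)) :=
    fun hc => h1 ((tiSorted_get_iff _ hs m k hk).mpr hc)
  have h2 : (tiP numbers operators)[k] < m + 1 := by omega
  have h2' := (tiSorted_get_iff _ hs (m + 1) k hk).mp h2
  have hsucc := tiCnt_succ numbers operators m hm hmn
  simp only [hn, if_true] at hsucc
  have hkc : k = tiCnt numbers operators m := by
    simp only [tiCnt] at hsucc h2' ⊢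
    omega
  subst hkc
  exact ⟨hk, hkm⟩

lemma tiTakeNext (V : List Int) (j c : Nat) (hj : j ≤ c) (hc : c < V.length) :
    (V.drop j).take (c + 1 - j) = (V.drop j).take (c - j) ++ [V[c]] := by
  have h1 : c + 1 - j = (c - j) + 1 := by omega
  rw [h1, List.take_add_one]
  have h2 : c - j < (V.drop j).length := by simp; omega
  rw [List.getElem?_eq_getElem h2]
  simp only [Option.toList_some]
  congr 2
  rw [List.getElem_drop]
  congr 1
  omega

lemma tiV_get_cnt (numbers : List String) (operators : String) (m : Int) (hm : 0 ≤ m)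
    (hmn : m < PySem.Str.len operators) (hn : tiNum numbers m = true) :
    ∃ h : tiCnt numbers operators m < (tiV numbers operators).length,
      (tiV numbers operators)[tiCnt numbers operators m] = tiVal numbers m := by
  obtain ⟨h, hm'⟩ := tiP_get_cnt numbers operators m hm hmn hn
  refine ⟨by rw [tiVP_len]; exact h, ?_⟩
  simp [tiV, hm']

lemma tiCnt_zero (numbers : List String) (operators : String) :
    tiCnt numbers operators 0 = 0 := by
  apply List.countP_eq_zero.mpr
  intro x hx
  have : x ∈ PySem.List.pyRange 0 (PySem.Str.len operators) 1 := List.mem_of_mem_filter hx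
  rw [PySem.List.mem_pyRange_one] at this
  simp only [decide_eq_true_eq]
  omega

-- the accumulating-group invariant of B's two-pointer sweep, at the start of a suffix
lemma tiB_loop (numbers : List String) (operators : String) :
    ∀ (L : List Int), ∀ (m : Int), L = PySem.List.pyRange m (PySem.Str.len operators) 1 → 0 ≤ m →
    ∀ (groups : List (List Int × String)) (pending : Char) (j : Nat),
      j ≤ tiCnt numbers operators m →
    (fun st : List (List Int × String) × Char × Nat =>
        st.1 ++ [(PySem.List.slice (tiV numbers operators) (some (st.2.2 : Int)) none, String.ofList [st.2.1])])
      (L.foldl (tiBStep numbers operators) (groups, pending, j))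
      = groups ++ tiRef numbers operators.toList L
          (((tiV numbers operators).drop j).take (tiCnt numbers operators m - j)) pending := by
  intro L
  induction L with
  | nil =>
    intro m hL hm groups pending j hj
    have hnm : PySem.Str.len operators ≤ m := by
      by_contra hc
      rw [PySem.List.pyRange_one_cons (by omega)] at hL
      simp at hL
    have hcnt : tiCnt numbers operators m = (tiP numbers operators).length := by
      simp only [tiCnt]
      apply List.countP_eq_length.mpr
      intro x hx
      have hx' : x ∈ PySem.List.pyRange 0 (PySem.Str.len operators) 1 := List.mem_of_mem_filter hx
      rw [PySem.List.mem_pyRange_one] at hx'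
      simp only [decide_eq_true_eq]
      omega
    have hlen : ((tiV numbers operators).drop j).length ≤ tiCnt numbers operators m - j := by
      have h1 := tiVP_len numbers operators
      rw [List.length_drop]
      omega
    rw [List.foldl_nil]
    dsimp only
    rw [tiRef, PySem.List.slice_from_natCast, List.take_of_length_le hlen]
  | cons a L ih =>
    intro m hL hm groups pending j hj
    have hlt : m < PySem.Str.len operators := by
      by_contra hc
      rw [PySem.List.pyRange_one_eq_nil (by omega)] at hL
      simp at hL
    rw [PySem.List.pyRange_one_cons hlt] at hL
    obtain ⟨ha, hL'⟩ : a = m ∧ L = PySem.List.pyRange (m + 1) (PySem.Str.len operators) 1 := by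
      simpa using hL
    have hsorted := tiP_sorted numbers operators
    have hcle := tiCnt_le numbers operators m
    have hsucc := tiCnt_succ numbers operators m hm hlt
    have hmono := tiCnt_mono numbers operators m hm hlt
    rw [ha, List.foldl_cons, tiRef]
    by_cases hop : (PySem.List.pyGetD operators.toList m ' ' == '+' || PySem.List.pyGetD operators.toList m ' ' == '*') = true
    · have hadv : tiAdvance (tiP numbers operators) m j = tiCnt numbers operators m :=
        tiAdvance_eq _ hsorted m j hj
      by_cases hjc : j < tiCnt numbers operators m
      · -- a group closes here
        have hstep : tiBStep numbers operators (groups, pending, j) m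
            = (groups ++ [(PySem.List.slice (tiV numbers operators) (some (j : Int))
                  (some ((tiCnt numbers operators m : Nat) : Int)), String.ofList [pending])],
               PySem.List.pyGetD operators.toList m ' ', tiCnt numbers operators m) := by
          unfold tiBStep
          rw [if_pos hop]
          dsimp only
          rw [hadv, if_pos hjc]
        rw [hstep, ih (m + 1) hL' (by omega) _ _ (tiCnt numbers operators m) (by omega)]
        have hne : ((((tiV numbers operators).drop j).take (tiCnt numbers operators m - j)).isEmpty) = false := by
          rw [List.isEmpty_eq_false_iff, ← List.length_pos_iff]
          rw [List.length_take, List.length_drop]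
          omega
        rw [if_pos (by rw [hop, hne]; rfl)]
        rw [PySem.List.slice_natCast]
        have hnums : ((tiV numbers operators).drop (tiCnt numbers operators m)).take
            (tiCnt numbers operators (m + 1) - tiCnt numbers operators m)
              = (if tiNum numbers m then [tiVal numbers m] else []) := by
          by_cases hn : tiNum numbers m
          · obtain ⟨hvlt, hv⟩ := tiV_get_cnt numbers operators m hm hlt hn
            rw [hsucc]
            simp only [hn, if_true]
            rw [tiTakeNext _ _ _ (le_refl _) hvlt]
            simp [hv]
          · rw [hsucc]
            simp [hn]
        rw [hnums]
        simp
      · -- operator column with no accumulated numbers: nothing closes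
        have hjc' : j = tiCnt numbers operators m := by omega
        have hstep : tiBStep numbers operators (groups, pending, j) m = (groups, pending, j) := by
          unfold tiBStep
          rw [if_pos hop]
          dsimp only
          rw [hadv, if_neg hjc]
        have hnil : (((tiV numbers operators).drop j).take (tiCnt numbers operators m - j)) = [] := by
          rw [hjc']
          simp
        rw [hstep, ih (m + 1) hL' (by omega) groups pending j (by omega)]
        rw [if_neg (by rw [hnil]; simp)]
        rw [hnil]
        congr 1
        by_cases hn : tiNum numbers m
        · obtain ⟨hvlt, hv⟩ := tiV_get_cnt numbers operators m hm hlt hn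
          rw [hsucc]
          simp only [hn, if_true, List.nil_append]
          subst hjc'
          rw [tiTakeNext _ _ _ (le_refl _) hvlt]
          simp [hv]
        · rw [hsucc]
          simp [hn, hnil]
    · -- not an operator column
      have hstep : tiBStep numbers operators (groups, pending, j) m = (groups, pending, j) := by
        unfold tiBStep
        rw [if_neg hop]
      have hop' : (PySem.List.pyGetD operators.toList m ' ' == '+' || PySem.List.pyGetD operators.toList m ' ' == '*') = false := by
        simpa using hop
      rw [hstep, ih (m + 1) hL' (by omega) groups pending j (by omega)]
      rw [if_neg (by rw [hop']; simp)]
      congr 1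
      by_cases hn : tiNum numbers m
      · obtain ⟨hvlt, hv⟩ := tiV_get_cnt numbers operators m hm hlt hn
        rw [hsucc]
        simp only [hn, if_true]
        rw [tiTakeNext _ _ _ (by omega) hvlt]
        simp [hv]
      · rw [hsucc]
        simp [hn]

-- the two ports, rewritten through the reference recursion
lemma tiA_eq (numbers : List String) (operators : String) :
    translate_input numbers operators
      = tiRef numbers operators.toList (PySem.List.pyRange 0 (PySem.Str.len operators) 1)
          [] ((PySem.Str.pyGet? operators 0).getD ' ') := by
  unfold translate_input
  exact tiA_fold numbers operators.toList _ [] [] _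

lemma tiB_eq (numbers : List String) (operators : String) :
    translate_input_alt numbers operators
      = tiRef numbers operators.toList (PySem.List.pyRange 0 (PySem.Str.len operators) 1)
          [] ((PySem.Str.pyGet? operators 0).getD ' ') := by
  unfold translate_input_alt
  rw [tiB_pv]
  dsimp only
  simp only [List.nil_append, tiP_eq]
  rw [PySem.List.enumerate_eq_map_pyRange (d := ' '), List.foldl_map]
  have h0 := tiB_loop numbers operators (PySem.List.pyRange 0 (PySem.Str.len operators) 1) 0 rfl
    (le_refl 0) [] ((PySem.Str.pyGet? operators 0).getD ' ') 0 (by simp [tiCnt_zero])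
  dsimp only at h0
  rw [tiCnt_zero] at h0
  simp only [Nat.sub_zero, List.take_zero, List.nil_append] at h0
  exact h0

-- ===== VERDICT (by name: the statement is the Claim_ definition above) =====
theorem translate_input_spec : Claim_equal_translate_input := by
  unfold Claim_equal_translate_input
  intro numbers operators _hd _hp
  unfold Spec_translate_input
  rw [tiA_eq, tiB_eq]
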